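-- pv_equiv track=rewrite | github.com/postvakje/oeis-sequences | oeis-sequences/OEISsequences.py | A212526
-- ===== SOURCE A (Python) =====
-- def A212526(n):
--     s, q = "", -n
--     while q >= 4 or q < 0:
--         q, r = divmod(q, -4)
--         if r < 0:
--             q += 1
--             r += 4
--         s += str(r)
--     return int(str(q) + s[::-1])
-- ===== SOURCE B (Python) =====
-- def A212526(n):
--     def f(q):
--         if 0 <= q < 4:
--             return str(q)
--         r = q % 4
--         return f((q - r) // (-4)) + str(r)
--     return int(f(-n))
-- ===== Notes on version B (the rewrite author's own statement) =====
-- stated objective: alternative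
-- what changed: Replaces A's iterative while-loop that accumulates digits least-significant-first into a string and then reverses it with a recursive helper that emits digits most-significant-first directly (no accumulator, no reversal).
import Mathlib
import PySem

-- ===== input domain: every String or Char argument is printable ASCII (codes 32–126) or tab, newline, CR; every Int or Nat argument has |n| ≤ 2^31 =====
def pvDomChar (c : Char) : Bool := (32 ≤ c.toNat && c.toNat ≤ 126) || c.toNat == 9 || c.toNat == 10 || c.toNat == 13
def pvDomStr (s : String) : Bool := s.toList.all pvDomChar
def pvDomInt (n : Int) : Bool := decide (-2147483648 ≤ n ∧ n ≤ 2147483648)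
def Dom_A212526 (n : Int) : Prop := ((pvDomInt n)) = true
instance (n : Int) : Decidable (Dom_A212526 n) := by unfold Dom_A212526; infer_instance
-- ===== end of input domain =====

-- B replaces A's while-loop (digits collected least-significant-first, then reversed)
-- by a recursion emitting digits most-significant-first; return value only, no side effects.

-- ===== PORT A =====
-- termination measure lemmas for the two recursions (cited by name in decreasing_by)
lemma pyLoopA_dec (q : Int) (h : 4 ≤ q ∨ q < 0) :
    2 * (if PySem.Int.mod q (-4) < 0 then PySem.Int.floordiv q (-4) + 1
          else PySem.Int.floordiv q (-4)).natAbs +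
      (if (if PySem.Int.mod q (-4) < 0 then PySem.Int.floordiv q (-4) + 1
            else PySem.Int.floordiv q (-4)) < 0 then 1 else 0) <
    2 * q.natAbs + (if q < 0 then 1 else 0) := by
  have h1 := PySem.Int.floordiv_mul_add_mod q (-4)
  have h2 := PySem.Int.mod_neg_bounds q (b := -4) (by norm_num)
  split_ifs <;> omega

lemma bRep_dec (q : Int) (h : ¬(0 ≤ q ∧ q < 4)) :
    2 * (PySem.Int.floordiv (q - PySem.Int.mod q 4) (-4)).natAbs +
      (if PySem.Int.floordiv (q - PySem.Int.mod q 4) (-4) < 0 then 1 else 0) <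
    2 * q.natAbs + (if q < 0 then 1 else 0) := by
  have h1 := PySem.Int.floordiv_mul_add_mod q 4
  have h2 := PySem.Int.mod_nonneg q (b := 4) (by norm_num)
  have h3 := PySem.Int.mod_lt q (b := 4) (by norm_num)
  have h4 := PySem.Int.floordiv_mul_add_mod (q - PySem.Int.mod q 4) (-4)
  have h5 : PySem.Int.mod (q - PySem.Int.mod q 4) (-4) = 0 := by
    rw [PySem.Int.mod_eq_zero_iff_dvd]
    exact ⟨-(PySem.Int.floordiv q 4), by omega⟩
  split_ifs <;> omega

-- the while loop: state (q, s); s kept as List Char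
def pyLoopA (q : Int) (s : List Char) : Int × List Char :=
  if 4 ≤ q ∨ q < 0 then
    let q1 := PySem.Int.floordiv q (-4)
    let r1 := PySem.Int.mod q (-4)
    let q2 := if r1 < 0 then q1 + 1 else q1
    let r2 := if r1 < 0 then r1 + 4 else r1
    pyLoopA q2 (s ++ PySem.Int.toChars r2)
  else (q, s)
termination_by 2 * q.natAbs + (if q < 0 then 1 else 0)
decreasing_by exact pyLoopA_dec q ‹_›

def A212526 (n : Int) : Int :=
  let (q, s) := pyLoopA (-n) []
  -- int(str(q) + s[::-1]); the string is always a valid decimal numeral, so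
  -- Python's int() never raises here and the .getD 0 default is never taken
  (PySem.Int.ofChars? (PySem.Int.toChars q ++ s.reverse)).getD 0

-- ===== PORT B =====
-- recursive helper f: base case 0 <= q < 4, else most-significant digits first
def bRep (q : Int) : List Char :=
  if 0 ≤ q ∧ q < 4 then PySem.Int.toChars q
  else
    let r := PySem.Int.mod q 4
    bRep (PySem.Int.floordiv (q - r) (-4)) ++ PySem.Int.toChars r
termination_by 2 * q.natAbs + (if q < 0 then 1 else 0)
decreasing_by exact bRep_dec q ‹_›

def A212526_alt (n : Int) : Int :=
  (PySem.Int.ofChars? (bRep (-n))).getD 0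

-- ===== PRECONDITION & SPEC =====
def Spec_A212526 (n : Int) (out : Int) : Prop := out = A212526_alt n
instance (n : Int) (out : Int) : Decidable (Spec_A212526 n out) := by unfold Spec_A212526; infer_instance

-- ===== CLAIM (what is proved, stated in full; the proofs are below) =====
def Claim_equal_A212526 : Prop := ∀ (n : Int), Dom_A212526 n → Spec_A212526 n (A212526 n)

-- ===== LEMMAS AND PROOFS =====

-- A's adjusted (quotient, remainder) equal B's (floordiv (q - q%4) (-4), q%4)
lemma step_r_eq (q : Int) :
    (if PySem.Int.mod q (-4) < 0 then PySem.Int.mod q (-4) + 4 else PySem.Int.mod q (-4))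
      = PySem.Int.mod q 4 := by
  have h1 := PySem.Int.floordiv_mul_add_mod q (-4)
  have h2 := PySem.Int.mod_neg_bounds q (b := -4) (by norm_num)
  have h3 := PySem.Int.floordiv_mul_add_mod q 4
  have h4 := PySem.Int.mod_nonneg q (b := 4) (by norm_num)
  have h5 := PySem.Int.mod_lt q (b := 4) (by norm_num)
  split <;> omega

lemma step_q_eq (q : Int) :
    (if PySem.Int.mod q (-4) < 0 then PySem.Int.floordiv q (-4) + 1 else PySem.Int.floordiv q (-4))
      = PySem.Int.floordiv (q - PySem.Int.mod q 4) (-4) := by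
  have h1 := PySem.Int.floordiv_mul_add_mod q (-4)
  have h2 := PySem.Int.mod_neg_bounds q (b := -4) (by norm_num)
  have h3 := PySem.Int.floordiv_mul_add_mod q 4
  have h4 := PySem.Int.mod_nonneg q (b := 4) (by norm_num)
  have h5 := PySem.Int.mod_lt q (b := 4) (by norm_num)
  have h6 := PySem.Int.floordiv_mul_add_mod (q - PySem.Int.mod q 4) (-4)
  have h7 : PySem.Int.mod (q - PySem.Int.mod q 4) (-4) = 0 := by
    rw [PySem.Int.mod_eq_zero_iff_dvd]
    exact ⟨-(PySem.Int.floordiv q 4), by omega⟩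
  split <;> omega

lemma toChars_digit_reverse (r : Int) (h0 : 0 ≤ r) (h4 : r < 4) :
    (PySem.Int.toChars r).reverse = PySem.Int.toChars r := by
  interval_cases r <;> decide

lemma loop_eq_bRep (q : Int) (s : List Char) :
    PySem.Int.toChars (pyLoopA q s).1 ++ (pyLoopA q s).2.reverse = bRep q ++ s.reverse := by
  induction q, s using pyLoopA.induct with
  | case1 q s h q1 r1 q2 r2 ih =>
    have hr : r2 = PySem.Int.mod q 4 := step_r_eq q
    have hq : q2 = PySem.Int.floordiv (q - PySem.Int.mod q 4) (-4) := step_q_eq q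
    have h0 := PySem.Int.mod_nonneg q (b := 4) (by norm_num)
    have h4 := PySem.Int.mod_lt q (b := 4) (by norm_num)
    have hstep : pyLoopA q s = pyLoopA q2 (s ++ PySem.Int.toChars r2) := by
      rw [pyLoopA]; simp only [if_pos h]; rfl
    rw [hstep, ih, hr, hq]
    conv_rhs => rw [bRep]
    rw [if_neg (by omega)]
    rw [List.reverse_append, toChars_digit_reverse _ h0 h4, List.append_assoc]
  | case2 q s h =>
    rw [pyLoopA, if_neg h, bRep, if_pos (by omega)]

-- ===== VERDICT (by name: the statement is the Claim_ definition above) =====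
theorem A212526_spec : Claim_equal_A212526 := by
  intro n _
  unfold Spec_A212526 A212526 A212526_alt
  have h := loop_eq_bRep (-n) []
  simp only [List.reverse_nil, List.append_nil] at h
  rw [← h]
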